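-- pv_equiv track=rewrite | github.com/Heoster/codeex-ai-v3 | ai_brain_integration.py | replace_math_functions
-- ===== SOURCE A (Python) =====
-- def replace_math_functions(expression: str) -> str:
--     """Replace mathematical function names with math module calls"""
--     replacements = {
--         'sin(': 'math.sin(',
--         'cos(': 'math.cos(',
--         'tan(': 'math.tan(',
--         'log(': 'math.log(',
--         'ln(': 'math.log(',
--         'sqrt(': 'math.sqrt(',
--         'exp(': 'math.exp(',
--         'abs(': 'abs(',
--         'floor(': 'math.floor(',
--         'ceil(': 'math.ceil('
--     }
--
--     for old, new in replacements.items():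
--         expression = expression.replace(old, new)
--
--     return expression
-- ===== SOURCE B (Python) =====
-- def _rewrite(part, replacements):
--     for name, repl in replacements.items():
--         if part.endswith(name):
--             return part[:len(part) - len(name)] + repl
--     return part
--
--
-- def replace_math_functions(expression: str) -> str:
--     """Replace mathematical function names with math module calls"""
--     replacements = {
--         'sin': 'math.sin',
--         'cos': 'math.cos',
--         'tan': 'math.tan',
--         'log': 'math.log',
--         'ln': 'math.log',
--         'sqrt': 'math.sqrt',
--         'exp': 'math.exp',
--         'abs': 'abs',
--         'floor': 'math.floor',
--         'ceil': 'math.ceil',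
--     }
--     parts = expression.split('(')
--     rewritten = [_rewrite(part, replacements) for part in parts[:-1]]
--     rewritten.append(parts[-1])
--     return '('.join(rewritten)
-- ===== Notes on version B (the rewrite author's own statement) =====
-- stated objective: alternative
-- what changed: Replaces ten sequential whole-string .replace passes by one split on the opening-parenthesis character followed by a single first-match suffix rewrite of each non-final segment and a join.
import Mathlib
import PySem

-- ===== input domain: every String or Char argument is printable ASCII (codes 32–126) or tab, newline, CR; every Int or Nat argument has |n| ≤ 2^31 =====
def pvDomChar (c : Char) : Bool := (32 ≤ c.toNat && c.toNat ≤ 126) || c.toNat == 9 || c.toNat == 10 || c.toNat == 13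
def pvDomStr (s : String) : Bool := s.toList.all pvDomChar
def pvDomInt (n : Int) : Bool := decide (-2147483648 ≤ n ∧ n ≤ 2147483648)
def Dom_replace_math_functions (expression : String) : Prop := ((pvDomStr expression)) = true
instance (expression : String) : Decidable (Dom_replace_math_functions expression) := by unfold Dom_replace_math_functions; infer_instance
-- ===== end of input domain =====

-- B replaces A's ten sequential whole-string .replace passes by ONE split on the opening-parenthesis
-- character, a first-match suffix rewrite of every non-final segment, and a join (alternative algorithm, same result).

-- ===== PORT A =====
def replace_math_functions (expression : String) : String :=
  let replacements : List (String × String) :=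
    [("sin(", "math.sin("), ("cos(", "math.cos("), ("tan(", "math.tan("),
     ("log(", "math.log("), ("ln(", "math.log("), ("sqrt(", "math.sqrt("),
     ("exp(", "math.exp("), ("abs(", "abs("), ("floor(", "math.floor("),
     ("ceil(", "math.ceil(")]
  replacements.foldl (fun e p => PySem.Str.replace e p.1 p.2) expression

-- ===== PORT B =====
-- the dict of Source B, at code-point level (port works on List Char via the PySem.Chars definitions)
def bReplacements : List (List Char × List Char) :=
  [("sin".toList, "math.sin".toList), ("cos".toList, "math.cos".toList),
   ("tan".toList, "math.tan".toList), ("log".toList, "math.log".toList),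
   ("ln".toList, "math.log".toList), ("sqrt".toList, "math.sqrt".toList),
   ("exp".toList, "math.exp".toList), ("abs".toList, "abs".toList),
   ("floor".toList, "math.floor".toList), ("ceil".toList, "math.ceil".toList)]

-- _rewrite of Source B: loop over the dict items, early return on the first suffix match
def bRewrite (part : List Char) : List (List Char × List Char) → List Char
  | [] => part
  | (name, repl) :: rest =>
    if PySem.Chars.endswith part name then
      PySem.Chars.slice part none (some (PySem.Chars.len part - PySem.Chars.len name)) ++ repl
    else bRewrite part rest

def replace_math_functions_alt (expression : String) : String :=
  let parts := PySem.Chars.splitOn expression.toList ['(']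
  let rewritten := (PySem.List.slice parts none (some (-1))).map (fun part => bRewrite part bReplacements)
  String.ofList (PySem.Chars.join ['('] (rewritten ++ [PySem.List.pyGetD parts (-1) []]))

-- ===== PRECONDITION & SPEC =====
def Spec_replace_math_functions (expression : String) (out : String) : Prop := out = replace_math_functions_alt expression
instance (expression : String) (out : String) : Decidable (Spec_replace_math_functions expression out) := by unfold Spec_replace_math_functions; infer_instance

-- ===== CLAIM (what is proved, stated in full; the proofs are below) =====
def Claim_equal_replace_math_functions : Prop := ∀ (expression : String), Dom_replace_math_functions expression → Spec_replace_math_functions expression (replace_math_functions expression)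

-- ===== LEMMAS AND PROOFS =====

-- split on '(' as a structural recursion (proof-side mirror of str.split('('))
def pvSplit : List Char → List (List Char)
  | [] => [[]]
  | c :: t =>
    if c = '(' then [] :: pvSplit t
    else match pvSplit t with
         | [] => [[c]]
         | h :: r => (c :: h) :: r

-- per-segment suffix rewrite performed by one .replace pass
def pvG (w w' p : List Char) : List Char :=
  if w <:+ p then p.take (p.length - w.length) ++ w' else p

-- apply f to every element except the last
def pvMapInit (f : List Char → List Char) : List (List Char) → List (List Char)
  | [] => []
  | [x] => [x]
  | x :: y :: r => f x :: pvMapInit f (y :: r)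

def pvGfold (reps : List (List Char × List Char)) (p : List Char) : List Char :=
  reps.foldl (fun q wn => pvG wn.1 wn.2 q) p

theorem pvSplit_ne_nil (s : List Char) : pvSplit s ≠ [] := by
  cases s with
  | nil => simp [pvSplit]
  | cons c t =>
    simp only [pvSplit]
    split
    · simp
    · split <;> simp

theorem pvSplit_noParen (s : List Char) : ∀ p ∈ pvSplit s, '(' ∉ p := by
  induction s with
  | nil => simp [pvSplit]
  | cons c t ih =>
    simp only [pvSplit]
    split
    · rename_i hc
      intro p hp
      rcases List.mem_cons.mp hp with hp | hp
      · simp [hp]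
      · exact ih p hp
    · rename_i hc
      split
      · rename_i hmatch
        exact absurd hmatch (pvSplit_ne_nil t)
      · rename_i h r hmatch
        intro p hp
        rcases List.mem_cons.mp hp with hp | hp
        · subst hp
          intro hmem
          rcases List.mem_cons.mp hmem with hmem | hmem
          · exact hc hmem.symm
          · exact ih h (by rw [hmatch]; exact List.mem_cons_self) hmem
        · exact ih p (by rw [hmatch]; exact List.mem_cons_of_mem _ hp)

theorem pvSplit_append (a b : List Char) (ha : '(' ∉ a) :
    pvSplit (a ++ '(' :: b) = a :: pvSplit b := by
  induction a with
  | nil => simp [pvSplit]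
  | cons c t ih =>
    have hc : c ≠ '(' := fun h => ha (h ▸ List.mem_cons_self)
    have ht : '(' ∉ t := fun h => ha (List.mem_cons_of_mem _ h)
    simp only [List.cons_append, pvSplit, if_neg hc, ih ht]

theorem pvSplit_nosep (s : List Char) (hs : '(' ∉ s) : pvSplit s = [s] := by
  induction s with
  | nil => simp [pvSplit]
  | cons c t ih =>
    have hc : c ≠ '(' := fun h => hs (h ▸ List.mem_cons_self)
    have ht : '(' ∉ t := fun h => hs (List.mem_cons_of_mem _ h)
    simp only [pvSplit, if_neg hc, ih ht]

theorem pvJoin_cons_cons (c : Char) (h : List Char) (r : List (List Char)) :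
    PySem.Chars.join ['('] ((c :: h) :: r) = c :: PySem.Chars.join ['('] (h :: r) := by
  cases r with
  | nil => simp [PySem.Chars.join, List.intercalate]
  | cons y ys => simp [PySem.Chars.join, List.intercalate]

theorem pvJoin_pvSplit (s : List Char) : PySem.Chars.join ['('] (pvSplit s) = s := by
  induction s with
  | nil => simp [pvSplit, PySem.Chars.join, List.intercalate]
  | cons c t ih =>
    simp only [pvSplit]
    split
    · rename_i hc
      subst hc
      rcases hl : pvSplit t with _ | ⟨h, r⟩
      · exact absurd hl (pvSplit_ne_nil t)
      · rw [hl] at ih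
        cases r <;> simp_all [PySem.Chars.join, List.intercalate]
    · rename_i hc
      split
      · rename_i hmatch
        exact absurd hmatch (pvSplit_ne_nil t)
      · rename_i h r hmatch
        rw [hmatch] at ih
        rw [pvJoin_cons_cons, ih]

theorem pvSplit_join (segs : List (List Char)) (hne : segs ≠ [])
    (hp : ∀ p ∈ segs, '(' ∉ p) : pvSplit (PySem.Chars.join ['('] segs) = segs := by
  induction segs with
  | nil => exact absurd rfl hne
  | cons x tail ih =>
    cases tail with
    | nil =>
      have : PySem.Chars.join ['('] [x] = x := by simp [PySem.Chars.join, List.intercalate]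
      rw [this]
      exact pvSplit_nosep x (hp x List.mem_cons_self)
    | cons y r =>
      have hx : '(' ∉ x := hp x List.mem_cons_self
      have hjoin : PySem.Chars.join ['('] (x :: y :: r) =
          x ++ '(' :: PySem.Chars.join ['('] (y :: r) := by
        simp [PySem.Chars.join, List.intercalate]
      rw [hjoin, pvSplit_append _ _ hx,
        ih (by simp) (fun p hp' => hp p (List.mem_cons_of_mem _ hp'))]

theorem pvSplit_decomp (t h : List Char) (r : List (List Char))
    (he : pvSplit t = h :: r) (hr : r ≠ []) : ∃ b, t = h ++ '(' :: b := by
  induction t generalizing h r with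
  | nil =>
    simp only [pvSplit, List.cons.injEq] at he
    exact absurd he.2.symm hr
  | cons c t' ih =>
    simp only [pvSplit] at he
    split at he
    · rename_i hc
      subst hc
      obtain ⟨h1, h2⟩ := List.cons.injEq .. ▸ he
      subst h1; subst h2
      exact ⟨t', rfl⟩
    · rename_i hc
      split at he
      · rename_i hmatch
        exact absurd hmatch (pvSplit_ne_nil t')
      · rename_i h' r' hmatch
        obtain ⟨h1, h2⟩ := List.cons.injEq .. ▸ he
        subst h1; subst h2
        obtain ⟨b, hb⟩ := ih h' r' hmatch hr
        exact ⟨b, by simp [hb]⟩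

theorem splitOn_go_spec (fuel : Nat) : ∀ (l cur : List Char) (acc : List (List Char)),
    l.length ≤ fuel →
    PySem.Chars.splitOn.go ['('] fuel l cur acc =
      acc.reverse ++ List.modifyHead (fun x => cur.reverse ++ x) (pvSplit l) := by
  induction fuel with
  | zero =>
    intro l cur acc hl
    have : l = [] := List.eq_nil_of_length_eq_zero (Nat.le_zero.mp hl)
    subst this
    simp [PySem.Chars.splitOn.go, pvSplit]
  | succ fuel ih =>
    intro l cur acc hl
    cases l with
    | nil => simp [PySem.Chars.splitOn.go, pvSplit]
    | cons c rest =>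
      by_cases hc : c = '('
      · subst hc
        have hpre : (['('] : List Char).isPrefixOf ('(' :: rest) = true := by
          simp [List.isPrefixOf]
        simp only [PySem.Chars.splitOn.go, hpre, if_pos]
        rw [show List.drop (['('] : List Char).length ('(' :: rest) = rest from rfl]
        rw [ih rest [] _ (by simpa using Nat.lt_succ_iff.mp (by simpa using hl))]
        simp only [pvSplit]
        rcases pvSplit rest with _ | ⟨h, r⟩ <;> simp [List.modifyHead]
      · have hpre : (['('] : List Char).isPrefixOf (c :: rest) = false := by
          simp [List.isPrefixOf]; exact fun h => absurd h.symm hc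
        simp only [PySem.Chars.splitOn.go, hpre]
        rw [if_neg (by simp)]
        rw [ih rest (c :: cur) acc (by simpa using Nat.lt_succ_iff.mp (by simpa using hl))]
        rcases hm : pvSplit rest with _ | ⟨h, r⟩
        · exact absurd hm (pvSplit_ne_nil rest)
        · simp [pvSplit, hc, hm, List.modifyHead]

theorem splitOn_eq_pvSplit (s : List Char) :
    PySem.Chars.splitOn s ['('] = pvSplit s := by
  unfold PySem.Chars.splitOn
  rw [splitOn_go_spec (s.length + 1) s [] [] (Nat.le_succ _)]
  rcases hm : pvSplit s with _ | ⟨h, r⟩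
  · exact absurd hm (pvSplit_ne_nil s)
  · simp [List.modifyHead]

theorem pvMapInit_ne_nil (f : List Char → List Char) (l : List (List Char)) (h : l ≠ []) :
    pvMapInit f l ≠ [] := by
  cases l with
  | nil => exact absurd rfl h
  | cons x t => cases t <;> simp [pvMapInit]

theorem pvJoin_cons (a : List Char) (x : List (List Char)) (hx : x ≠ []) :
    PySem.Chars.join ['('] (a :: x) = a ++ '(' :: PySem.Chars.join ['('] x := by
  cases x with
  | nil => exact absurd rfl hx
  | cons y ys => simp [PySem.Chars.join, List.intercalate]

theorem pvG_self (w w' : List Char) : pvG w w' w = w' := by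
  unfold pvG
  rw [if_pos (List.suffix_refl w)]
  simp

theorem pvG_nil (w w' : List Char) (hne : w ≠ []) : pvG w w' [] = [] := by
  unfold pvG
  rw [if_neg (fun h => hne (List.suffix_nil.mp h))]

theorem pvG_cons (w w' : List Char) (c : Char) (h : List Char)
    (hd : w <:+ h ∨ ¬ w <:+ c :: h) : pvG w w' (c :: h) = c :: pvG w w' h := by
  rcases hd with hsh | hn
  · have hsc : w <:+ c :: h := List.suffix_cons_iff.mpr (Or.inr hsh)
    have hwl : w.length ≤ h.length := hsh.length_le
    unfold pvG
    rw [if_pos hsc, if_pos hsh]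
    simp only [List.length_cons]
    rw [show h.length + 1 - w.length = (h.length - w.length) + 1 from by omega,
      List.take_succ_cons]
    simp
  · have hnh : ¬ w <:+ h := fun hh => hn (List.suffix_cons_iff.mpr (Or.inr hh))
    unfold pvG
    rw [if_neg hn, if_neg hnh]

theorem replace_go_spec (w w' : List Char) (hw : '(' ∉ w)
    (hne : w ≠ []) (fuel : Nat) : ∀ (l acc : List Char), l.length ≤ fuel →
    PySem.Chars.replace.go (w ++ ['(']) (w' ++ ['(']) fuel l acc =
      acc.reverse ++ PySem.Chars.join ['('] (pvMapInit (pvG w w') (pvSplit l)) := by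
  induction fuel with
  | zero =>
    intro l acc hl
    have : l = [] := List.eq_nil_of_length_eq_zero (Nat.le_zero.mp hl)
    subst this
    simp [PySem.Chars.replace.go, pvSplit, pvMapInit, PySem.Chars.join, List.intercalate]
  | succ fuel ih =>
    intro l acc hl
    cases l with
    | nil => simp [PySem.Chars.replace.go, pvSplit, pvMapInit, PySem.Chars.join, List.intercalate]
    | cons c t =>
      by_cases hpre : (w ++ ['(']) <+: (c :: t)
      · have hb : (w ++ ['(']).isPrefixOf (c :: t) = true := List.isPrefixOf_iff_prefix.mpr hpre
        obtain ⟨b, hbe⟩ := hpre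
        have hle : b.length ≤ fuel := by
          have := congrArg List.length hbe
          simp at this hl
          omega
        simp only [PySem.Chars.replace.go, hb, if_pos]
        rw [show List.drop (w ++ ['(']).length (c :: t) = b from by
          rw [← hbe]; exact List.drop_left]
        rw [ih b _ hle]
        have hct : c :: t = w ++ '(' :: b := by rw [← hbe]; simp
        rw [hct, pvSplit_append _ _ hw]
        rcases hm : pvSplit b with _ | ⟨h, r⟩
        · exact absurd hm (pvSplit_ne_nil b)
        · rw [show pvMapInit (pvG w w') (w :: h :: r) =
              pvG w w' w :: pvMapInit (pvG w w') (h :: r) from rfl]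
          rw [pvG_self]
          rw [pvJoin_cons _ _ (pvMapInit_ne_nil _ _ (by simp))]
          simp
      · have hb : (w ++ ['(']).isPrefixOf (c :: t) = false := by
          rw [Bool.eq_false_iff]
          exact fun hh => hpre (List.isPrefixOf_iff_prefix.mp hh)
        simp only [PySem.Chars.replace.go, hb, Bool.false_eq_true, if_false]
        rw [ih t (c :: acc) (by simpa using Nat.lt_succ_iff.mp (by simpa using hl))]
        have key : PySem.Chars.join ['('] (pvMapInit (pvG w w') (pvSplit (c :: t))) =
            c :: PySem.Chars.join ['('] (pvMapInit (pvG w w') (pvSplit t)) := by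
          by_cases hc : c = '('
          · subst hc
            rw [show pvSplit ('(' :: t) = [] :: pvSplit t from by simp [pvSplit]]
            rcases hm : pvSplit t with _ | ⟨h, r⟩
            · exact absurd hm (pvSplit_ne_nil t)
            · rw [show pvMapInit (pvG w w') ([] :: h :: r) =
                  pvG w w' [] :: pvMapInit (pvG w w') (h :: r) from rfl]
              rw [pvG_nil _ _ hne]
              rw [pvJoin_cons _ _ (pvMapInit_ne_nil _ _ (by simp))]
              simp
          · rcases hm : pvSplit t with _ | ⟨h, r⟩
            · exact absurd hm (pvSplit_ne_nil t)
            · have hsplit : pvSplit (c :: t) = (c :: h) :: r := by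
                simp only [pvSplit, if_neg hc, hm]
              rw [hsplit]
              cases r with
              | nil => simp [pvMapInit, PySem.Chars.join, List.intercalate]
              | cons y ys =>
                have hdisj : w <:+ h ∨ ¬ w <:+ c :: h := by
                  by_cases hsh : w <:+ h
                  · exact Or.inl hsh
                  · refine Or.inr (fun hsc => ?_)
                    rcases List.suffix_cons_iff.mp hsc with heq | hsh'
                    · obtain ⟨b, hbb⟩ := pvSplit_decomp t h (y :: ys) hm (by simp)
                      exact hpre ⟨b, by rw [heq]; simp [hbb]⟩
                    · exact hsh hsh'
                rw [show pvMapInit (pvG w w') ((c :: h) :: y :: ys) =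
                    pvG w w' (c :: h) :: pvMapInit (pvG w w') (y :: ys) from rfl]
                rw [pvG_cons _ _ _ _ hdisj]
                rw [pvJoin_cons_cons]
                rfl
        rw [key]
        simp

theorem replace_eq_pvSplit (s w w' : List Char) (hw : '(' ∉ w)
    (hne : w ≠ []) :
    PySem.Chars.replace s (w ++ ['(']) (w' ++ ['(']) =
      PySem.Chars.join ['('] (pvMapInit (pvG w w') (pvSplit s)) := by
  unfold PySem.Chars.replace
  rw [if_neg (by simp)]
  rw [replace_go_spec w w' hw hne s.length s [] (Nat.le_refl _)]
  simp

theorem pvMapInit_comp (f g : List Char → List Char) (l : List (List Char)) :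
    pvMapInit f (pvMapInit g l) = pvMapInit (fun x => f (g x)) l := by
  induction l with
  | nil => simp [pvMapInit]
  | cons x t ih =>
    cases t with
    | nil => simp [pvMapInit]
    | cons y r =>
      rcases hm : pvMapInit g (y :: r) with _ | ⟨a, b⟩
      · exact absurd hm (pvMapInit_ne_nil g _ (by simp))
      · simp only [pvMapInit]
        rw [hm]
        simp only [pvMapInit]
        rw [← hm, ih]

theorem pvMapInit_congr (f g : List Char → List Char) (l : List (List Char))
    (h : ∀ x ∈ l, f x = g x) : pvMapInit f l = pvMapInit g l := by
  induction l with
  | nil => simp [pvMapInit]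
  | cons x t ih =>
    cases t with
    | nil => simp [pvMapInit]
    | cons y r =>
      simp only [pvMapInit]
      rw [h x List.mem_cons_self, ih (fun z hz => h z (List.mem_cons_of_mem _ hz))]

theorem pvMapInit_id (l : List (List Char)) : pvMapInit (fun x => x) l = l := by
  induction l with
  | nil => simp [pvMapInit]
  | cons x t ih =>
    cases t with
    | nil => simp [pvMapInit]
    | cons y r => simp only [pvMapInit] at ih ⊢; rw [ih]

theorem pvG_noParen (w w' p : List Char) (hw' : '(' ∉ w') (hp : '(' ∉ p) :
    '(' ∉ pvG w w' p := by
  unfold pvG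
  split
  · intro hmem
    rcases List.mem_append.mp hmem with hmem | hmem
    · exact hp (List.take_subset _ _ hmem)
    · exact hw' hmem
  · exact hp

theorem pvMapInit_mem (f : List Char → List Char) (l : List (List Char)) :
    ∀ p ∈ pvMapInit f l, p ∈ l ∨ ∃ x ∈ l, p = f x := by
  induction l with
  | nil => simp [pvMapInit]
  | cons x t ih =>
    cases t with
    | nil =>
      intro p hp
      simp only [pvMapInit] at hp
      exact Or.inl hp
    | cons y r =>
      intro p hp
      simp only [pvMapInit] at hp
      rcases List.mem_cons.mp hp with hp | hp
      · exact Or.inr ⟨x, List.mem_cons_self, hp⟩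
      · rcases ih p hp with h | ⟨z, hz, hze⟩
        · exact Or.inl (List.mem_cons_of_mem _ h)
        · exact Or.inr ⟨z, List.mem_cons_of_mem _ hz, hze⟩

-- first char-level take lemma for part[:len(part)-len(name)]
theorem slice_take (l : List Char) (k : Nat) (hk : k ≤ l.length) :
    PySem.Chars.slice l none (some ((l.length : Int) - (k : Int))) = l.take (l.length - k) := by
  simp only [PySem.Chars.slice_eq_listSlice]
  simp only [PySem.List.slice, PySem.List.clampIdx]
  rw [if_neg (by omega : ¬ ((l.length : Int) - (k : Int) < 0))]
  simp only [List.drop_zero, Nat.sub_zero]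
  congr 1
  omega

-- the composition of A's replace passes, segment-wise
theorem foldA_eq (reps : List (List Char × List Char))
    (hc : ∀ q ∈ reps, '(' ∉ q.1 ∧ '(' ∉ q.2 ∧ q.1 ≠ []) (s : List Char) :
    reps.foldl (fun e q => PySem.Chars.replace e (q.1 ++ ['(']) (q.2 ++ ['('])) s =
      PySem.Chars.join ['('] (pvMapInit (pvGfold reps) (pvSplit s)) := by
  induction reps generalizing s with
  | nil =>
    simp only [List.foldl_nil]
    rw [pvMapInit_congr (pvGfold []) (fun x => x) _ (fun x _ => rfl), pvMapInit_id,
      pvJoin_pvSplit]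
  | cons q rest ih =>
    have hq := hc q List.mem_cons_self
    simp only [List.foldl_cons]
    rw [replace_eq_pvSplit s q.1 q.2 hq.1 hq.2.2]
    rw [ih (fun r hr => hc r (List.mem_cons_of_mem _ hr))]
    rw [pvSplit_join _ (pvMapInit_ne_nil _ _ (pvSplit_ne_nil s)) (fun p hp => ?_)]
    · rw [pvMapInit_comp]
      rfl
    · rcases pvMapInit_mem _ _ p hp with h | ⟨x, hx, hxe⟩
      · exact pvSplit_noParen s p h
      · rw [hxe]
        exact pvG_noParen _ _ _ hq.2.1 (pvSplit_noParen s x hx)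

theorem pvGfold_of_no_match (reps : List (List Char × List Char)) (p : List Char)
    (h : ∀ q ∈ reps, ¬ q.1 <:+ p) : pvGfold reps p = p := by
  induction reps generalizing p with
  | nil => rfl
  | cons q rest ih =>
    have h1 : pvG q.1 q.2 p = p := if_neg (h q List.mem_cons_self)
    show List.foldl _ (pvG q.1 q.2 p) rest = p
    rw [h1]
    exact ih p (fun q hq => h q (List.mem_cons_of_mem _ hq))

-- sequential per-segment rewrites = first-match rewrite, given non-interference of the table
theorem pvGfold_eq_bRewrite (reps : List (List Char × List Char))
    (hp : reps.Pairwise (fun x y => ¬ y.1 <:+ x.2 ∧ ¬ x.2 <:+ y.1)) (p : List Char) :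
    pvGfold reps p = bRewrite p reps := by
  induction reps with
  | nil => rfl
  | cons q rest ih =>
    obtain ⟨w, w'⟩ := q
    have hhead := List.pairwise_cons.mp hp
    by_cases hsuf : w <:+ p
    · have hend : PySem.Chars.endswith p w = true := (PySem.Chars.endswith_iff p w).mpr hsuf
      show pvGfold rest (pvG w w' p) = bRewrite p ((w, w') :: rest)
      simp only [bRewrite, hend, if_pos]
      rw [pvGfold_of_no_match rest _ (fun q hq hq1 => ?_)]
      · unfold pvG
        rw [if_pos hsuf]
        rw [show PySem.Chars.len p - PySem.Chars.len w =
            ((p.length : Int) - (w.length : Int)) from by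
          simp [PySem.Chars.len]]
        rw [slice_take p w.length hsuf.length_le]
      · have hw'suf : w' <:+ pvG w w' p := by
          unfold pvG
          rw [if_pos hsuf]
          exact List.suffix_append _ _
        rcases List.suffix_or_suffix_of_suffix hq1 hw'suf with h1 | h1
        · exact (hhead.1 q hq).1 h1
        · exact (hhead.1 q hq).2 h1
    · have hend : PySem.Chars.endswith p w = false := by
        rw [Bool.eq_false_iff]
        exact fun h => hsuf ((PySem.Chars.endswith_iff p w).mp h)
      show pvGfold rest (pvG w w' p) = bRewrite p ((w, w') :: rest)
      rw [show pvG w w' p = p from if_neg hsuf]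
      simp only [bRewrite, hend, Bool.false_eq_true, if_false]
      exact ih hhead.2

theorem pvMapInit_eq_dropLast_map (f : List Char → List Char) (l : List (List Char))
    (h : l ≠ []) : pvMapInit f l = l.dropLast.map f ++ [l.getLast h] := by
  induction l with
  | nil => exact absurd rfl h
  | cons x t ih =>
    cases t with
    | nil => simp [pvMapInit]
    | cons y r =>
      simp only [pvMapInit]
      rw [ih (by simp)]
      simp [List.getLast]

theorem slice_to_neg_one (l : List (List Char)) :
    PySem.List.slice l none (some (-1)) = l.dropLast := by
  cases l with
  | nil => simp [PySem.List.slice, PySem.List.clampIdx]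
  | cons x t =>
    simp [PySem.List.slice, List.dropLast_eq_take]

theorem pyGetD_neg_one (l : List (List Char)) (h : l ≠ []) :
    PySem.List.pyGetD l (-1) [] = l.getLast h := by
  unfold PySem.List.pyGetD PySem.List.pyGet? PySem.List.pyIdx?
  cases l with
  | nil => exact absurd rfl h
  | cons x t =>
    have h1 : ¬ (0 : Int) ≤ -1 := by omega
    have h2 : -((x :: t).length : Int) ≤ -1 := by
      simp only [List.length_cons]; omega
    simp only [if_neg h1, if_pos h2]
    have h3 : (x :: t).length - (-(-1 : Int)).toNat = t.length := by simp
    rw [h3]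
    rw [List.getLast_eq_getElem]
    simp only [List.length_cons, Nat.add_sub_cancel]
    simp
    rfl

-- ===== VERDICT (by name: the statement is the Claim_ definition above) =====
set_option maxHeartbeats 2000000 in
theorem replace_math_functions_spec : Claim_equal_replace_math_functions := by
  intro expression _hdom
  unfold Spec_replace_math_functions
  have hcond : ∀ q ∈ bReplacements, '(' ∉ q.1 ∧ '(' ∉ q.2 ∧ q.1 ≠ [] := by decide
  have hpair : bReplacements.Pairwise (fun x y => ¬ y.1 <:+ x.2 ∧ ¬ x.2 <:+ y.1) := by decide
  have hA : replace_math_functions expression =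
      String.ofList (bReplacements.foldl
        (fun e q => PySem.Chars.replace e (q.1 ++ ['(']) (q.2 ++ ['('])) expression.toList) := by
    simp only [replace_math_functions, bReplacements, List.foldl, PySem.Str.replace,
      String.toList_ofList]
    rw [show ("sin(" : String).toList = "sin".toList ++ ['('] from by decide]
    rw [show ("math.sin(" : String).toList = "math.sin".toList ++ ['('] from by decide]
    rw [show ("cos(" : String).toList = "cos".toList ++ ['('] from by decide]
    rw [show ("math.cos(" : String).toList = "math.cos".toList ++ ['('] from by decide]
    rw [show ("tan(" : String).toList = "tan".toList ++ ['('] from by decide]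
    rw [show ("math.tan(" : String).toList = "math.tan".toList ++ ['('] from by decide]
    rw [show ("log(" : String).toList = "log".toList ++ ['('] from by decide]
    rw [show ("math.log(" : String).toList = "math.log".toList ++ ['('] from by decide]
    rw [show ("ln(" : String).toList = "ln".toList ++ ['('] from by decide]
    rw [show ("sqrt(" : String).toList = "sqrt".toList ++ ['('] from by decide]
    rw [show ("math.sqrt(" : String).toList = "math.sqrt".toList ++ ['('] from by decide]
    rw [show ("exp(" : String).toList = "exp".toList ++ ['('] from by decide]
    rw [show ("math.exp(" : String).toList = "math.exp".toList ++ ['('] from by decide]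
    rw [show ("abs(" : String).toList = "abs".toList ++ ['('] from by decide]
    rw [show ("floor(" : String).toList = "floor".toList ++ ['('] from by decide]
    rw [show ("math.floor(" : String).toList = "math.floor".toList ++ ['('] from by decide]
    rw [show ("ceil(" : String).toList = "ceil".toList ++ ['('] from by decide]
    rw [show ("math.ceil(" : String).toList = "math.ceil".toList ++ ['('] from by decide]
  rw [hA, foldA_eq bReplacements hcond expression.toList]
  unfold replace_math_functions_alt
  rw [splitOn_eq_pvSplit]
  show _ = String.ofList (PySem.Chars.join ['(']
    ((PySem.List.slice (pvSplit expression.toList) none (some (-1))).map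
        (fun part => bRewrite part bReplacements) ++
      [PySem.List.pyGetD (pvSplit expression.toList) (-1) []]))
  rw [slice_to_neg_one, pyGetD_neg_one _ (pvSplit_ne_nil _)]
  apply congrArg String.ofList
  apply congrArg (PySem.Chars.join ['('])
  rw [pvMapInit_eq_dropLast_map _ _ (pvSplit_ne_nil _)]
  apply congrArg (fun z => z ++ [(pvSplit expression.toList).getLast (pvSplit_ne_nil _)])
  exact List.map_congr_left (fun p _ => pvGfold_eq_bRewrite bReplacements hpair p)
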